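-- pv_equiv track=rewrite | github.com/AlexMGitHub/DS-A_Python | src/dsa/chapter1_exercises.py | odd_pair
-- ===== SOURCE A (Python) =====
-- def odd_pair(nums):
--     """C-1.14
--     Write a short Python function that takes a sequence of integer values and
--     determines if there is a distinct pair of numbers in the sequence whose
--     product is odd.
--
--     --------------------------------------------------------------------------
--     Solution:
--     --------------------------------------------------------------------------
--     The product of two odd numbers will produce an odd number.  If there are at
--     least two (unique) odd numbers in the sequence, the function should return
--     True.
--     """
--     uniques = set(nums)
--     odd_count = 0
--     for num in uniques:
--         if num % 2 != 0:
--             odd_count += 1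
--             if odd_count > 1:
--                 break
--     return odd_count > 1
-- ===== SOURCE B (Python) =====
-- def odd_pair(nums):
--     first = None
--     for num in nums:
--         if num % 2 != 0:
--             if first is None:
--                 first = num
--             elif num != first:
--                 return True
--     return False
-- ===== Notes on version B (the rewrite author's own statement) =====
-- stated objective: simpler
-- what changed: Instead of building a set of all elements and then counting odd members of it, B does one pass over the raw list keeping a single scalar sentinel (the first odd value seen) and returns True on meeting a different odd value.
import Mathlib
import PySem

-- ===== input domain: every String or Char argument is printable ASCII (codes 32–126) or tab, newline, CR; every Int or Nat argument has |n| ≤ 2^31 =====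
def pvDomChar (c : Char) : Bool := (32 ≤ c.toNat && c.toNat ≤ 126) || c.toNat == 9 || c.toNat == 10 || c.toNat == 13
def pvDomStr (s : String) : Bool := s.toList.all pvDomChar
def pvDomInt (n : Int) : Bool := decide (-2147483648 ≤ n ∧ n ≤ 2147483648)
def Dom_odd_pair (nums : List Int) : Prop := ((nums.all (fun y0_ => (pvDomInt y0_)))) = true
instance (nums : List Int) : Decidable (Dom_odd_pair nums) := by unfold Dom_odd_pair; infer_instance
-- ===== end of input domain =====

-- B replaces A's set-of-all-elements plus odd count by a single pass over the raw list
-- with one scalar sentinel (the first odd value seen); objective: simpler.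

-- ===== PORT A =====
-- A's 'for num in uniques: … break' loop, carrying odd_count (the result is order-independent,
-- so iterating the Set in first-occurrence order is exact)
def oddPairLoopA : List Int → Nat → Nat
  | [], c => c
  | n :: ns, c =>
    if PySem.Int.mod n 2 ≠ 0 then
      if c + 1 > 1 then c + 1 else oddPairLoopA ns (c + 1)
    else oddPairLoopA ns c

def odd_pair (nums : List Int) : Bool :=
  let uniques : PySem.Set Int := PySem.Set.ofList nums
  decide (oddPairLoopA uniques 0 > 1)

-- ===== PORT B =====
def oddPairLoopB : List Int → Option Int → Bool
  | [], _ => false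
  | n :: ns, first =>
    if PySem.Int.mod n 2 ≠ 0 then
      match first with
      | none => oddPairLoopB ns (some n)
      | some f => if n ≠ f then true else oddPairLoopB ns (some f)
    else oddPairLoopB ns first

def odd_pair_alt (nums : List Int) : Bool := oddPairLoopB nums none

-- ===== PRECONDITION & SPEC =====
def Spec_odd_pair (nums : List Int) (out : Bool) : Prop := out = odd_pair_alt nums
instance (nums : List Int) (out : Bool) : Decidable (Spec_odd_pair nums out) := by unfold Spec_odd_pair; infer_instance

-- ===== CLAIM (what is proved, stated in full; the proofs are below) =====
def Claim_equal_odd_pair : Prop := ∀ (nums : List Int), Dom_odd_pair nums → Spec_odd_pair nums (odd_pair nums)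

-- ===== LEMMAS AND PROOFS =====

-- shared characterisation: the input holds two distinct odd values
def TwoOdds (l : List Int) : Prop :=
  ∃ a ∈ l, ∃ b ∈ l, a % 2 = 1 ∧ b % 2 = 1 ∧ a ≠ b

-- A's loop started at 1: reaches 2 iff some odd element remains
lemma loopA_one (l : List Int) :
    1 < oddPairLoopA l 1 ↔ ∃ x ∈ l, x % 2 = 1 := by
  induction l with
  | nil => simp [oddPairLoopA]
  | cons n ns ih =>
    by_cases h : n % 2 = 1 <;> simp [oddPairLoopA, h, ih]

-- A's loop started at 0: reaches 2 iff the list holds ≥ 2 odd elements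
lemma loopA_zero (l : List Int) :
    1 < oddPairLoopA l 0 ↔ 2 ≤ (l.filter (fun x => decide (x % 2 = 1))).length := by
  induction l with
  | nil => simp [oddPairLoopA]
  | cons n ns ih =>
    by_cases h : n % 2 = 1
    · have hmem : (∃ x ∈ ns, x % 2 = 1) ↔
          0 < (ns.filter (fun x => decide (x % 2 = 1))).length := by
        rw [List.length_pos_iff_exists_mem]
        simp [List.mem_filter]
      have e : oddPairLoopA (n :: ns) 0 = oddPairLoopA ns 1 := by
        simp [oddPairLoopA, h]
      rw [e, loopA_one, hmem, List.filter_cons, if_pos (by simp [h])]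
      simp only [List.length_cons]
      omega
    · simp [oddPairLoopA, h, ih]

lemma two_le_length_nodup {α : Type} (m : List α) (h : m.Nodup) :
    2 ≤ m.length ↔ ∃ a ∈ m, ∃ b ∈ m, a ≠ b := by
  constructor
  · intro hlen
    match m, h with
    | a :: b :: t, h =>
      refine ⟨a, by simp, b, by simp, ?_⟩
      simp [List.nodup_cons] at h
      exact fun hab => h.1.1 (hab ▸ rfl)
  · rintro ⟨a, ha, b, hb, hab⟩
    match m with
    | [] => simp at ha
    | [c] =>
      simp at ha hb
      exact absurd (ha.trans hb.symm) hab
    | x :: y :: t => simp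
-- A returns true exactly on inputs with two distinct odd values
lemma odd_pair_iff (nums : List Int) : odd_pair nums = true ↔ TwoOdds nums := by
  have hnd : (PySem.Set.ofList nums).Nodup := PySem.Set.nodup_ofList nums
  have hz := loopA_zero (PySem.Set.ofList nums)
  simp only [odd_pair, decide_eq_true_eq, gt_iff_lt]
  rw [hz, two_le_length_nodup _ (hnd.filter _)]
  constructor
  · rintro ⟨a, ha, b, hb, hab⟩
    simp only [List.mem_filter, decide_eq_true_eq, PySem.Set.mem_ofList] at ha hb
    exact ⟨a, ha.1, b, hb.1, ha.2, hb.2, hab⟩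
  · rintro ⟨a, ha, b, hb, hoa, hob, hab⟩
    refine ⟨a, ?_, b, ?_, hab⟩ <;>
      simp [List.mem_filter, PySem.Set.mem_ofList, *]

-- B's loop with a sentinel set: fires iff some odd element differs from the sentinel
lemma loopB_some (l : List Int) (f : Int) :
    oddPairLoopB l (some f) = true ↔ ∃ x ∈ l, x % 2 = 1 ∧ x ≠ f := by
  induction l with
  | nil => simp [oddPairLoopB]
  | cons n ns ih =>
    by_cases h : n % 2 = 1
    · by_cases hnf : n = f
      · subst hnf
        simp [oddPairLoopB, h, ih]
      · simp [oddPairLoopB, h, hnf]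
    · simp only [oddPairLoopB]
      rw [if_neg (by simpa using h), ih]
      constructor
      · rintro ⟨x, hx, hp⟩; exact ⟨x, by simp [hx], hp⟩
      · rintro ⟨x, hx, hp⟩
        rcases List.mem_cons.mp hx with rfl | hx
        · exact absurd hp.1 h
        · exact ⟨x, hx, hp⟩

-- B returns true exactly on inputs with two distinct odd values
lemma odd_pair_alt_iff (nums : List Int) : odd_pair_alt nums = true ↔ TwoOdds nums := by
  unfold odd_pair_alt
  induction nums with
  | nil => simp [oddPairLoopB, TwoOdds]
  | cons n ns ih =>
    by_cases h : n % 2 = 1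
    · rw [show oddPairLoopB (n :: ns) none = oddPairLoopB ns (some n) from by
        simp [oddPairLoopB, h], loopB_some]
      constructor
      · rintro ⟨x, hx, hox, hxn⟩
        exact ⟨n, by simp, x, by simp [hx], h, hox, fun e => hxn e.symm⟩
      · rintro ⟨a, ha, b, hb, hoa, hob, hab⟩
        rcases List.mem_cons.mp ha with han | ha
        · rcases List.mem_cons.mp hb with hbn | hb
          · exact absurd (han.trans hbn.symm) hab
          · exact ⟨b, hb, hob, fun e => hab (han.trans e.symm)⟩
        · rcases List.mem_cons.mp hb with hbn | hb
          · exact ⟨a, ha, hoa, fun e => hab (e.trans hbn.symm)⟩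
          · by_cases han : a = n
            · exact ⟨b, hb, hob, fun e => hab (han.trans e.symm)⟩
            · exact ⟨a, ha, hoa, han⟩
    · rw [show oddPairLoopB (n :: ns) none = oddPairLoopB ns none from by
        simp [oddPairLoopB, h], ih]
      unfold TwoOdds
      constructor
      · rintro ⟨a, ha, b, hb, hp⟩
        exact ⟨a, by simp [ha], b, by simp [hb], hp⟩
      · rintro ⟨a, ha, b, hb, hoa, hob, hab⟩
        rcases List.mem_cons.mp ha with rfl | ha
        · exact absurd hoa h
        · rcases List.mem_cons.mp hb with rfl | hb
          · exact absurd hob h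
          · exact ⟨a, ha, b, hb, hoa, hob, hab⟩

-- ===== VERDICT (by name: the statement is the Claim_ definition above) =====
theorem odd_pair_spec : Claim_equal_odd_pair := by
  intro nums _
  show odd_pair nums = odd_pair_alt nums
  rw [Bool.eq_iff_iff, odd_pair_iff, odd_pair_alt_iff]
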